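-- pv_equiv track=rewrite | github.com/WillemKauf/AdventOfCode | 2018/20.py | part_1
-- ===== SOURCE A (Python) =====
-- from collections import deque
--
-- def part_1(input_str):
--     input_str = input_str[1:-1]
--     ddir      = {"N":(0,1), "S":(0,-1), "W":(-1,0), "E":(1,0)}
--     grid      = {}
--     queue     = deque([])
--     max_steps = -1
--     num_steps = 0
--     pos       = (0,0)
--     for c in input_str:
--         if c == "(":
--             queue.appendleft((pos, num_steps))
--         elif c == ")":
--             pos, num_steps = queue.popleft()
--         elif c == "|":
--             pos, num_steps = queue[0]
--         else:
--             num_steps += 1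
--             dd  = ddir[c]
--             pos = pos[0] + dd[0], pos[1] + dd[1]
--             if pos in grid:
--                 grid[pos] = min(grid[pos], num_steps)
--             else:
--                 grid[pos] = num_steps
--     return max(grid.values()), len([v for v in grid.values() if v >= 1000])
-- ===== SOURCE B (Python) =====
-- def part_1(input_str):
--     s = input_str[1:-1]
--     ddir = {"N": (0, 1), "S": (0, -1), "W": (-1, 0), "E": (1, 0)}
--     grid = {}
--
--     def walk(i, pos, steps):
--         # Parse from index i until the matching ')' (or end of s); return the
--         # index just past that ')'.  'start' is the state at group entry: '|'
--         # resets to it, and the caller resumes from its own state at the '('.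
--         start = (pos, steps)
--         while i < len(s):
--             c = s[i]
--             if c == ")":
--                 return i + 1
--             if c == "|":
--                 pos, steps = start
--                 i += 1
--             elif c == "(":
--                 i = walk(i + 1, pos, steps)
--             else:
--                 steps += 1
--                 dx, dy = ddir[c]
--                 pos = (pos[0] + dx, pos[1] + dy)
--                 grid[pos] = min(grid.get(pos, steps), steps)
--                 i += 1
--         return i
--
--     walk(0, (0, 0), 0)
--     return max(grid.values()), len([v for v in grid.values() if v >= 1000])
-- ===== Notes on version B (the rewrite author's own statement) =====
-- stated objective: alternative
-- what changed: Replaced the single loop driving an explicit deque of saved (pos, steps) frames by a recursive-descent parser over the nested paren structure: a recursive walk handles one group, '|' resets to the state captured at group entry, and the caller resumes from its own state after the matching ')' — no stack data structure at all.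
import Mathlib
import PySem

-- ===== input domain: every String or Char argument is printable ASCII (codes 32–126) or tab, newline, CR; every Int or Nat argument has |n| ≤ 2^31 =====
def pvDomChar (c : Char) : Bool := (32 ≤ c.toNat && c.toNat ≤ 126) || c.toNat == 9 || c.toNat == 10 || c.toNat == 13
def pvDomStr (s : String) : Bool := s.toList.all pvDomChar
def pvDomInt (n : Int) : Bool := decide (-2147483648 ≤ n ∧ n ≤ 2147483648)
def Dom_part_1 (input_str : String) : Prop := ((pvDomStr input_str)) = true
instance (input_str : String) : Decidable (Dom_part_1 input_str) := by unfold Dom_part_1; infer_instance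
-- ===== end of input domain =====

-- B replaces A's explicit deque of saved (pos, steps) frames by a recursive-descent
-- parser over the nested paren structure (objective: alternative decomposition, same cost).

-- ===== PORT A =====
abbrev pvGrid : Type := PySem.Dict (Int × Int) Int

def pvDdir : PySem.Dict Char (Int × Int) :=
  PySem.Dict.ofList [('N', (0, 1)), ('S', (0, -1)), ('W', (-1, 0)), ('E', (1, 0))]

abbrev pvStA : Type := pvGrid × List ((Int × Int) × Int) × (Int × Int) × Int

-- one iteration of A's `for c in input_str` loop; `none` = the Python raised
-- (IndexError on deque underflow, KeyError on a character not in ddir)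
def pvStepA (σ : Option pvStA) (c : Char) : Option pvStA :=
  match σ with
  | none => none
  | some (g, q, pos, n) =>
    if c = '(' then some (g, (pos, n) :: q, pos, n)
    else if c = ')' then
      match q with
      | [] => none
      | fr :: q' => some (g, q', fr.1, fr.2)
    else if c = '|' then
      match q with
      | [] => none
      | fr :: q' => some (g, fr :: q', fr.1, fr.2)
    else
      match PySem.Dict.get? pvDdir c with
      | none => none
      | some dd =>
        let n' := n + 1
        let pos' := (pos.1 + dd.1, pos.2 + dd.2)
        match PySem.Dict.get? g pos' with
        | some v => some (PySem.Dict.insert g pos' (min v n'), q, pos', n')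
        | none => some (PySem.Dict.insert g pos' n', q, pos', n')

def part_1 (input_str : String) : Int × Int :=
  let cs := PySem.List.slice input_str.toList (some 1) (some (-1))
  match cs.foldl pvStepA (some ((PySem.Dict.empty : pvGrid), [], ((0 : Int), (0 : Int)), (0 : Int))) with
  | none => (0, 0)   -- A raised; excluded by Pre_part_1
  | some (g, _, _, _) =>
    let vs := PySem.Dict.values g
    ((PySem.List.max? vs (fun v => v)).getD 0,   -- max of empty grid raises; excluded by Pre_part_1
     ((vs.filter (fun v => decide (1000 ≤ v))).length : Int))

-- ===== PORT B =====
-- B's recursive `walk`: parses from s until the matching ')' (or end), returning the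
-- remainder after that ')' and the updated grid; `start` is the state at group entry
-- ('|' resets to it); fuel = length of the list, always sufficient (pvWalkB_len).
-- grid = none models B's KeyError on a character not in ddir (excluded by Pre_part_1).
def pvWalkB (fuel : Nat) (s : List Char) (pos : Int × Int) (n : Int)
    (start : (Int × Int) × Int) (og : Option pvGrid) : List Char × Option pvGrid :=
  match fuel with
  | 0 => (s, og)
  | f + 1 =>
    match s with
    | [] => ([], og)
    | c :: rest =>
      if c = ')' then (rest, og)
      else if c = '|' then pvWalkB f rest start.1 start.2 start og
      else if c = '(' then
        let p := pvWalkB f rest pos n (pos, n) og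
        pvWalkB f p.1 pos n start p.2
      else
        let dd := PySem.Dict.getD pvDdir c (0, 0)
        let n' := n + 1
        let pos' := (pos.1 + dd.1, pos.2 + dd.2)
        let og' : Option pvGrid :=
          match PySem.Dict.get? pvDdir c with
          | none => none    -- KeyError in B's Python
          | some _ => og.map (fun g =>
              PySem.Dict.insert g pos' (min (PySem.Dict.getD g pos' n') n'))
        pvWalkB f rest pos' n' start og'

def part_1_alt (input_str : String) : Int × Int :=
  let cs := PySem.List.slice input_str.toList (some 1) (some (-1))
  match (pvWalkB cs.length cs ((0 : Int), (0 : Int)) 0 (((0 : Int), (0 : Int)), (0 : Int))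
          (some (PySem.Dict.empty : pvGrid))).2 with
  | none => (0, 0)
  | some g =>
    let vs := PySem.Dict.values g
    ((PySem.List.max? vs (fun v => v)).getD 0,
     ((vs.filter (fun v => decide (1000 ≤ v))).length : Int))

-- ===== PRECONDITION & SPEC =====
-- balanced-paren check: ')' and '|' never occur at depth 0 (A's deque never underflows)
def pvValid : List Char → Nat → Bool
  | [], _ => true
  | c :: s, d =>
    if c = '(' then pvValid s (d + 1)
    else if c = ')' then match d with | 0 => false | d' + 1 => pvValid s d'
    else if c = '|' then decide (d ≠ 0) && pvValid s d
    else pvValid s d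

-- Pre_ excludes exactly the inputs on which A raises: deque underflow (IndexError),
-- a character outside "NSWE()|" (KeyError), or no direction letter at all, i.e. an
-- empty grid (max() ValueError). A returns on every input Pre_ admits.
def Pre_part_1 (input_str : String) : Prop :=
  pvValid (PySem.List.slice input_str.toList (some 1) (some (-1))) 0 = true ∧
  (PySem.List.slice input_str.toList (some 1) (some (-1))).all
      (fun c => "NSWE()|".toList.contains c) = true ∧
  (PySem.List.slice input_str.toList (some 1) (some (-1))).any
      (fun c => "NSWE".toList.contains c) = true
instance (input_str : String) : Decidable (Pre_part_1 input_str) := by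
  unfold Pre_part_1; infer_instance

def pvWitness_part_1 : String := "^N(E|W)S$"

def Spec_part_1 (input_str : String) (out : Int × Int) : Prop := out = part_1_alt input_str
instance (input_str : String) (out : Int × Int) : Decidable (Spec_part_1 input_str out) := by unfold Spec_part_1; infer_instance

-- ===== CLAIM (what is proved, stated in full; the proofs are below) =====
def Claim_equal_part_1 : Prop := ∀ (input_str : String), Dom_part_1 input_str → Pre_part_1 input_str → Spec_part_1 input_str (part_1 input_str)

-- ===== LEMMAS AND PROOFS =====

-- lift B's optional grid to an A-machine state with the given stack and current frame
def pvLift (st : List ((Int × Int) × Int)) (p : (Int × Int) × Int)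
    (og : Option pvGrid) : Option pvStA :=
  match og with
  | none => none
  | some g => some (g, st, p.1, p.2)

def pvGridOf (σ : Option pvStA) : Option pvGrid := σ.map (·.1)

theorem pvGridOf_lift (st : List ((Int × Int) × Int)) (p : (Int × Int) × Int)
    (og : Option pvGrid) : pvGridOf (pvLift st p og) = og := by
  cases og <;> rfl

theorem pvFoldA_none (s : List Char) : s.foldl pvStepA none = none := by
  induction s with
  | nil => rfl
  | cons c t ih => simpa [pvStepA] using ih

theorem pvWalkB_poison (f : Nat) : ∀ (s : List Char) (pos : Int × Int) (n : Int)
    (start : (Int × Int) × Int), (pvWalkB f s pos n start none).2 = none := by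
  induction f with
  | zero => intro s pos n start; rfl
  | succ f ih =>
    intro s pos n start
    cases s with
    | nil => rfl
    | cons c rest =>
      by_cases h1 : c = ')'
      · simp [pvWalkB, h1]
      by_cases h2 : c = '|'
      · simpa [pvWalkB, h1, h2] using ih rest start.1 start.2 start
      by_cases h3 : c = '('
      · simp only [pvWalkB, if_neg h1, if_neg h2, if_pos h3]
        rw [ih rest pos n (pos, n)]
        exact ih _ pos n start
      · simp only [pvWalkB, if_neg h1, if_neg h2, if_neg h3]
        cases PySem.Dict.get? pvDdir c <;> simpa using ih rest _ _ start

theorem pvWalkB_len (f : Nat) : ∀ (s : List Char) (pos : Int × Int) (n : Int)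
    (start : (Int × Int) × Int) (og : Option pvGrid),
    (pvWalkB f s pos n start og).1.length ≤ s.length := by
  induction f with
  | zero => intro s pos n start og; exact le_refl _
  | succ f ih =>
    intro s pos n start og
    cases s with
    | nil => exact Nat.le_refl _
    | cons c rest =>
      by_cases h1 : c = ')'
      · simp [pvWalkB, h1]
      by_cases h2 : c = '|'
      · simp only [pvWalkB, if_neg h1, if_pos h2]
        exact le_trans (ih rest start.1 start.2 start og) (Nat.le_succ _)
      by_cases h3 : c = '('
      · simp only [pvWalkB, if_neg h1, if_neg h2, if_pos h3]
        exact le_trans (le_trans (ih _ pos n start _) (ih rest pos n (pos, n) og))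
          (Nat.le_succ _)
      · simp only [pvWalkB, if_neg h1, if_neg h2, if_neg h3]
        exact le_trans (ih rest _ _ start _) (Nat.le_succ _)

-- MAIN INVARIANT: inside a group, A's fold with frame `fr` on top of the stack equals
-- B's walk to the matching ')' followed by A's fold of the remainder after popping.
theorem pvMain (f : Nat) : ∀ (s : List Char) (pos : Int × Int) (n : Int)
    (fr : (Int × Int) × Int) (st : List ((Int × Int) × Int)) (og : Option pvGrid),
    s.length ≤ f →
    pvGridOf (s.foldl pvStepA (pvLift (fr :: st) (pos, n) og)) =
    pvGridOf ((pvWalkB f s pos n fr og).1.foldl pvStepA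
        (pvLift st fr (pvWalkB f s pos n fr og).2)) := by
  induction f with
  | zero =>
    intro s pos n fr st og hlen
    have hs : s = [] := List.eq_nil_of_length_eq_zero (Nat.le_zero.mp hlen)
    subst hs
    simp [pvWalkB, pvGridOf_lift]
  | succ f ih =>
    intro s pos n fr st og hlen
    cases s with
    | nil => simp [pvWalkB, pvGridOf_lift]
    | cons c rest =>
      cases og with
      | none =>
        simp only [pvLift, pvFoldA_none]
        rw [pvWalkB_poison]
        simp [pvLift, pvFoldA_none, pvGridOf]
      | some g =>
        have hlen' : rest.length ≤ f := Nat.le_of_succ_le_succ hlen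
        by_cases h1 : c = ')'
        · subst h1
          simp [pvWalkB, pvStepA, pvLift, List.foldl_cons]
        by_cases h2 : c = '|'
        · subst h2
          have := ih rest fr.1 fr.2 fr st (some g) hlen'
          simp only [pvWalkB, if_neg h1, if_pos rfl]
          simpa [pvStepA, pvLift, List.foldl_cons, h1] using this
        by_cases h3 : c = '('
        · subst h3
          have hlen1 : (pvWalkB f rest pos n (pos, n) (some g)).1.length ≤ f :=
            le_trans (pvWalkB_len f rest pos n (pos, n) (some g)) hlen'
          have ih1 := ih rest pos n (pos, n) (fr :: st) (some g) hlen'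
          have ih2 := ih (pvWalkB f rest pos n (pos, n) (some g)).1 pos n fr st
            (pvWalkB f rest pos n (pos, n) (some g)).2 hlen1
          simp only [pvWalkB, if_neg h1, if_neg h2, if_pos rfl]
          calc pvGridOf (List.foldl pvStepA (pvLift (fr :: st) (pos, n) (some g)) ('(' :: rest))
              = pvGridOf (List.foldl pvStepA (pvLift ((pos, n) :: fr :: st) (pos, n) (some g)) rest) := by
                simp [pvStepA, pvLift, List.foldl_cons, h1, h2]
            _ = pvGridOf ((pvWalkB f rest pos n (pos, n) (some g)).1.foldl pvStepA
                  (pvLift (fr :: st) (pos, n) (pvWalkB f rest pos n (pos, n) (some g)).2)) := ih1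
            _ = _ := ih2
        · -- direction letter (or an unknown character: both sides go to none)
          cases hdd : PySem.Dict.get? pvDdir c with
          | none =>
            have hstep : List.foldl pvStepA (pvLift (fr :: st) (pos, n) (some g)) (c :: rest) = none := by
              simp [pvStepA, pvLift, List.foldl_cons, h1, h2, h3, hdd, pvFoldA_none]
            simp only [pvWalkB, if_neg h1, if_neg h2, if_neg h3, hdd, hstep]
            simp [pvWalkB_poison, pvLift, pvFoldA_none, pvGridOf]
          | some dd =>
            have hgetD : PySem.Dict.getD pvDdir c (0, 0) = dd := by
              simp [PySem.Dict.getD, hdd]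
            have hstep : List.foldl pvStepA (pvLift (fr :: st) (pos, n) (some g)) (c :: rest) =
                List.foldl pvStepA (pvLift (fr :: st) ((pos.1 + dd.1, pos.2 + dd.2), n + 1)
                  (some (PySem.Dict.insert g (pos.1 + dd.1, pos.2 + dd.2)
                    (min (PySem.Dict.getD g (pos.1 + dd.1, pos.2 + dd.2) (n + 1)) (n + 1))))) rest := by
              cases hg : PySem.Dict.get? g (pos.1 + dd.1, pos.2 + dd.2) with
              | none => simp [pvStepA, pvLift, List.foldl_cons, h1, h2, h3, hdd, PySem.Dict.getD, hg]
              | some v => simp [pvStepA, pvLift, List.foldl_cons, h1, h2, h3, hdd, PySem.Dict.getD, hg]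
            rw [hstep]
            simp only [pvWalkB, if_neg h1, if_neg h2, if_neg h3, hdd, hgetD, Option.map_some]
            exact ih rest (pos.1 + dd.1, pos.2 + dd.2) (n + 1) fr st _ hlen'

-- walking one group preserves validity: if s is valid at depth d+1, the remainder
-- after the matching ')' is valid at depth d
theorem pvValid_walk (f : Nat) : ∀ (s : List Char) (d : Nat) (pos : Int × Int) (n : Int)
    (start : (Int × Int) × Int) (og : Option pvGrid), s.length ≤ f →
    pvValid s (d + 1) = true → pvValid (pvWalkB f s pos n start og).1 d = true := by
  induction f with
  | zero =>
    intro s d pos n start og hlen _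
    have hs : s = [] := List.eq_nil_of_length_eq_zero (Nat.le_zero.mp hlen)
    subst hs; rfl
  | succ f ih =>
    intro s d pos n start og hlen hv
    cases s with
    | nil => rfl
    | cons c rest =>
      have hlen' : rest.length ≤ f := Nat.le_of_succ_le_succ hlen
      by_cases h1 : c = ')'
      · subst h1
        simpa [pvWalkB, pvValid] using hv
      by_cases h2 : c = '|'
      · subst h2
        simp [pvValid] at hv
        simp only [pvWalkB, if_neg h1, if_pos rfl]
        exact ih rest d start.1 start.2 start og hlen' hv
      by_cases h3 : c = '('
      · subst h3
        simp only [pvValid, if_neg h1, if_neg h2, if_pos rfl] at hv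
        simp only [pvWalkB, if_neg h1, if_neg h2, if_pos rfl]
        have hv1 := ih rest (d + 1) pos n (pos, n) og hlen' hv
        have hlen1 : (pvWalkB f rest pos n (pos, n) og).1.length ≤ f :=
          le_trans (pvWalkB_len f rest pos n (pos, n) og) hlen'
        exact ih _ d pos n start _ hlen1 hv1
      · simp only [pvValid, if_neg h1, if_neg h2, if_neg h3] at hv
        simp only [pvWalkB, if_neg h1, if_neg h2, if_neg h3]
        exact ih rest d _ _ start _ hlen' hv

-- TOP LEVEL: on a valid string A's whole fold (empty stack) produces exactly B's grid
theorem pvTop (f : Nat) : ∀ (s : List Char) (pos : Int × Int) (n : Int)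
    (start : (Int × Int) × Int) (og : Option pvGrid), s.length ≤ f →
    pvValid s 0 = true →
    pvGridOf (s.foldl pvStepA (pvLift [] (pos, n) og)) = (pvWalkB f s pos n start og).2 := by
  induction f with
  | zero =>
    intro s pos n start og hlen _
    have hs : s = [] := List.eq_nil_of_length_eq_zero (Nat.le_zero.mp hlen)
    subst hs
    simp [pvWalkB, pvGridOf_lift]
  | succ f ih =>
    intro s pos n start og hlen hv
    cases s with
    | nil => simp [pvWalkB, pvGridOf_lift]
    | cons c rest =>
      cases og with
      | none =>
        simp only [pvLift, pvFoldA_none]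
        rw [pvWalkB_poison]
        rfl
      | some g =>
        have hlen' : rest.length ≤ f := Nat.le_of_succ_le_succ hlen
        by_cases h1 : c = ')'
        · subst h1; simp [pvValid] at hv
        by_cases h2 : c = '|'
        · subst h2; simp [pvValid, h1] at hv
        by_cases h3 : c = '('
        · subst h3
          simp only [pvValid, if_neg h1, if_neg h2, if_pos rfl] at hv
          simp only [pvWalkB, if_neg h1, if_neg h2, if_pos rfl]
          have hlen1 : (pvWalkB f rest pos n (pos, n) (some g)).1.length ≤ f :=
            le_trans (pvWalkB_len f rest pos n (pos, n) (some g)) hlen'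
          have hv1 := pvValid_walk f rest 0 pos n (pos, n) (some g) hlen' hv
          have hmain := pvMain f rest pos n (pos, n) [] (some g) hlen'
          have ihr := ih (pvWalkB f rest pos n (pos, n) (some g)).1 pos n start
            (pvWalkB f rest pos n (pos, n) (some g)).2 hlen1 hv1
          calc pvGridOf (List.foldl pvStepA (pvLift [] (pos, n) (some g)) ('(' :: rest))
              = pvGridOf (List.foldl pvStepA (pvLift [(pos, n)] (pos, n) (some g)) rest) := by
                simp [pvStepA, pvLift, List.foldl_cons, h1, h2]
            _ = pvGridOf ((pvWalkB f rest pos n (pos, n) (some g)).1.foldl pvStepA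
                  (pvLift [] (pos, n) (pvWalkB f rest pos n (pos, n) (some g)).2)) := hmain
            _ = _ := ihr
        · simp only [pvValid, if_neg h1, if_neg h2, if_neg h3] at hv
          cases hdd : PySem.Dict.get? pvDdir c with
          | none =>
            have hstep : List.foldl pvStepA (pvLift [] (pos, n) (some g)) (c :: rest) = none := by
              simp [pvStepA, pvLift, List.foldl_cons, h1, h2, h3, hdd, pvFoldA_none]
            simp only [pvWalkB, if_neg h1, if_neg h2, if_neg h3, hdd, hstep]
            simp [pvWalkB_poison, pvGridOf]
          | some dd =>
            have hgetD : PySem.Dict.getD pvDdir c (0, 0) = dd := by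
              simp [PySem.Dict.getD, hdd]
            have hstep : List.foldl pvStepA (pvLift [] (pos, n) (some g)) (c :: rest) =
                List.foldl pvStepA (pvLift [] ((pos.1 + dd.1, pos.2 + dd.2), n + 1)
                  (some (PySem.Dict.insert g (pos.1 + dd.1, pos.2 + dd.2)
                    (min (PySem.Dict.getD g (pos.1 + dd.1, pos.2 + dd.2) (n + 1)) (n + 1))))) rest := by
              cases hg : PySem.Dict.get? g (pos.1 + dd.1, pos.2 + dd.2) with
              | none => simp [pvStepA, pvLift, List.foldl_cons, h1, h2, h3, hdd, PySem.Dict.getD, hg]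
              | some v => simp [pvStepA, pvLift, List.foldl_cons, h1, h2, h3, hdd, PySem.Dict.getD, hg]
            rw [hstep]
            simp only [pvWalkB, if_neg h1, if_neg h2, if_neg h3, hdd, hgetD, Option.map_some]
            exact ih rest (pos.1 + dd.1, pos.2 + dd.2) (n + 1) start _ hlen' hv

-- both ports' identical post-processing, extracted for the final congruence step
def pvFinish (og : Option pvGrid) : Int × Int :=
  match og with
  | none => (0, 0)
  | some g =>
    let vs := PySem.Dict.values g
    ((PySem.List.max? vs (fun v => v)).getD 0,
     ((vs.filter (fun v => decide (1000 ≤ v))).length : Int))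

theorem part_1_eq_finish (input_str : String) :
    part_1 input_str = pvFinish (pvGridOf
      ((PySem.List.slice input_str.toList (some 1) (some (-1))).foldl pvStepA
        (pvLift [] (((0 : Int), (0 : Int)), (0 : Int)) (some (PySem.Dict.empty : pvGrid))))) := by
  show (match (PySem.List.slice input_str.toList (some 1) (some (-1))).foldl pvStepA
      (some ((PySem.Dict.empty : pvGrid), [], ((0 : Int), (0 : Int)), (0 : Int))) with
    | none => ((0 : Int), (0 : Int))
    | some (g, _, _, _) =>
      ((PySem.List.max? (PySem.Dict.values g) (fun v => v)).getD 0,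
       (((PySem.Dict.values g).filter (fun v => decide (1000 ≤ v))).length : Int))) = _
  cases h : (PySem.List.slice input_str.toList (some 1) (some (-1))).foldl pvStepA
      (some ((PySem.Dict.empty : pvGrid), [], ((0 : Int), (0 : Int)), (0 : Int))) with
  | none => simp [pvLift, h, pvGridOf, pvFinish]
  | some st =>
    obtain ⟨g, q, p, m⟩ := st
    simp [pvLift, h, pvGridOf, pvFinish]

theorem part_1_alt_eq_finish (input_str : String) :
    part_1_alt input_str = pvFinish
      ((pvWalkB (PySem.List.slice input_str.toList (some 1) (some (-1))).length
        (PySem.List.slice input_str.toList (some 1) (some (-1)))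
        ((0 : Int), (0 : Int)) 0 (((0 : Int), (0 : Int)), (0 : Int))
        (some (PySem.Dict.empty : pvGrid))).2) := by
  show (match (pvWalkB (PySem.List.slice input_str.toList (some 1) (some (-1))).length
        (PySem.List.slice input_str.toList (some 1) (some (-1)))
        ((0 : Int), (0 : Int)) 0 (((0 : Int), (0 : Int)), (0 : Int))
        (some (PySem.Dict.empty : pvGrid))).2 with
    | none => ((0 : Int), (0 : Int))
    | some g =>
      ((PySem.List.max? (PySem.Dict.values g) (fun v => v)).getD 0,
       (((PySem.Dict.values g).filter (fun v => decide (1000 ≤ v))).length : Int))) = _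
  cases h : (pvWalkB (PySem.List.slice input_str.toList (some 1) (some (-1))).length
        (PySem.List.slice input_str.toList (some 1) (some (-1)))
        ((0 : Int), (0 : Int)) 0 (((0 : Int), (0 : Int)), (0 : Int))
        (some (PySem.Dict.empty : pvGrid))).2 with
  | none => simp [pvFinish]
  | some g => simp [pvFinish]

-- ===== VERDICT (by name: the statement is the Claim_ definition above) =====
theorem part_1_spec : Claim_equal_part_1 := by
  intro input_str _hdom hpre
  unfold Spec_part_1
  rw [part_1_eq_finish, part_1_alt_eq_finish]
  congr 1
  exact pvTop _ _ _ _ _ _ (le_refl _) hpre.1
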